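-- pv_equiv track=rewrite | github.com/huangxiaohui1991/trade | scripts/state/service.py | _trade_review_tags
-- ===== SOURCE A (Python) =====
-- def _trade_review_tags(reason_codes: list[str]) -> list[str]:
--     tags = []
--     for code in reason_codes:
--         text = str(code or "").strip().upper()
--         if not text:
--             continue
--         if text.startswith("RISK_") and "risk" not in tags:
--             tags.append("risk")
--         elif text.startswith("POOL_") and "pool" not in tags:
--             tags.append("pool")
--         elif text.startswith("PAPER_RECONCILE") and "reconcile" not in tags:
--             tags.append("reconcile")
--         elif text.startswith("BUY_") and "entry" not in tags:
--             tags.append("entry")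
--         elif text.startswith("TRADE_") and "trade" not in tags:
--             tags.append("trade")
--     return tags
-- ===== SOURCE B (Python) =====
-- _PREFIX_TAGS = (
--     ("RISK_", "risk"),
--     ("POOL_", "pool"),
--     ("PAPER_RECONCILE", "reconcile"),
--     ("BUY_", "entry"),
--     ("TRADE_", "trade"),
-- )
--
--
-- def _classify(text):
--     for prefix, tag in _PREFIX_TAGS:
--         if text.startswith(prefix):
--             return tag
--     return None
--
--
-- def _trade_review_tags(reason_codes: list[str]) -> list[str]:
--     seq = [t for code in reason_codes if (t := _classify(str(code or "").strip().upper()))]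
--     present = [tag for _, tag in _PREFIX_TAGS if tag in seq]
--     return sorted(present, key=seq.index)
-- ===== Notes on version B (the rewrite author's own statement) =====
-- stated objective: alternative
-- what changed: B replaces A's single append-with-membership-check loop by three staged passes: a prefix-table classification pass producing the tag sequence, a selection of the present tags in table order, and a final sort of those tags by their first-occurrence index (key=seq.index), which reconstructs A's first-seen output order.
import Mathlib
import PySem

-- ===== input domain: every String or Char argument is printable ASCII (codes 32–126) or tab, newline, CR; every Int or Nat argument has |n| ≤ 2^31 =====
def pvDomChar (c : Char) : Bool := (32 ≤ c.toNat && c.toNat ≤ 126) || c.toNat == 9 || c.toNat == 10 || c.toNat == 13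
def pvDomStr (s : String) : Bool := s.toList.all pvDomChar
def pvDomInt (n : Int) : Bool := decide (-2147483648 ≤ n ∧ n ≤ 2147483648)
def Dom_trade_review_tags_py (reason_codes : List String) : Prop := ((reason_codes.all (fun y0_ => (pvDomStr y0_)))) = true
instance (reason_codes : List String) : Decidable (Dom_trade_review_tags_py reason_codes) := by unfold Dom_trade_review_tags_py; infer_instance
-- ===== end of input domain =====

-- B replaces A's single append-with-membership-check loop by three staged passes
-- (classification via a prefix table, selection of the present tags, a sort by
-- first-occurrence index); objective: alternative decomposition, same cost.


-- ===== PORT A =====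
-- A's loop body (the elif chain over one code), kept as a named helper
def pvStepA (tags : List String) (code : String) : List String :=
  let text := PySem.Str.upper (PySem.Str.strip code)
  if text = "" then tags
  else if PySem.Str.startswith text "RISK_" && !(tags.contains "risk") then tags ++ ["risk"]
  else if PySem.Str.startswith text "POOL_" && !(tags.contains "pool") then tags ++ ["pool"]
  else if PySem.Str.startswith text "PAPER_RECONCILE" && !(tags.contains "reconcile") then tags ++ ["reconcile"]
  else if PySem.Str.startswith text "BUY_" && !(tags.contains "entry") then tags ++ ["entry"]
  else if PySem.Str.startswith text "TRADE_" && !(tags.contains "trade") then tags ++ ["trade"]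
  else tags

def trade_review_tags_py (reason_codes : List String) : List String :=
  reason_codes.foldl pvStepA []

-- ===== PORT B =====
def pvPrefixTags : List (String × String) :=
  [("RISK_", "risk"), ("POOL_", "pool"), ("PAPER_RECONCILE", "reconcile"),
   ("BUY_", "entry"), ("TRADE_", "trade")]

-- B's _classify: tag of the first matching prefix in the table, else None
def pvClassify (text : String) : Option String :=
  (pvPrefixTags.find? (fun pt => PySem.Str.startswith text pt.1)).map (·.2)

-- seq.index is only called on tags the previous pass found in seq, so the total
-- (index? ·).getD 0 is exact there.
def trade_review_tags_py_alt (reason_codes : List String) : List String :=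
  let seq := reason_codes.filterMap (fun code => pvClassify (PySem.Str.upper (PySem.Str.strip code)))
  let present := (pvPrefixTags.filter (fun pt => decide (pt.2 ∈ seq))).map (·.2)
  PySem.List.sorted present (fun t => (PySem.List.index? seq t).getD 0) false

-- ===== PRECONDITION & SPEC =====
def Spec_trade_review_tags_py (reason_codes : List String) (out : List String) : Prop := out = trade_review_tags_py_alt reason_codes
instance (reason_codes : List String) (out : List String) : Decidable (Spec_trade_review_tags_py reason_codes out) := by unfold Spec_trade_review_tags_py; infer_instance

-- ===== CLAIM (what is proved, stated in full; the proofs are below) =====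
def Claim_equal_trade_review_tags_py : Prop := ∀ (reason_codes : List String), Dom_trade_review_tags_py reason_codes → Spec_trade_review_tags_py reason_codes (trade_review_tags_py reason_codes)

-- ===== LEMMAS AND PROOFS =====

-- the classified tag sequence (proof-side name for B's first pass)
def pvSeq (codes : List String) : List String :=
  codes.filterMap (fun code => pvClassify (PySem.Str.upper (PySem.Str.strip code)))

-- if p is a prefix of s and neither of p, q is a prefix of the other, q is not a prefix of s
theorem pv_prefix_excl {s p q : List Char}
    (hpq : ¬ p <+: q) (hqp : ¬ q <+: p)
    (hp : PySem.Chars.startswith s p = true) : PySem.Chars.startswith s q = false := by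
  rw [PySem.Chars.startswith_iff] at hp
  rw [Bool.eq_false_iff, Ne, PySem.Chars.startswith_iff]
  intro hq
  rcases List.prefix_or_prefix_of_prefix hp hq with h | h
  · exact hpq h
  · exact hqp h

-- A's loop body equals "add the classified tag (if any) when unseen"
theorem pv_step_eq (tags : List String) (code : String) :
    pvStepA tags code =
    (match pvClassify (PySem.Str.upper (PySem.Str.strip code)) with
     | none => tags
     | some t => PySem.Set.add tags t) := by
  unfold pvStepA pvClassify pvPrefixTags
  generalize PySem.Str.upper (PySem.Str.strip code) = text
  by_cases h0 : text = ""
  · subst h0; rfl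
  · simp only [if_neg h0, PySem.Str.startswith_eq]
    by_cases h1 : PySem.Chars.startswith text.toList ['R','I','S','K','_']
    · have e2 := pv_prefix_excl (q := ['P','O','O','L','_']) (by decide) (by decide) h1
      have e3 := pv_prefix_excl (q := ['P','A','P','E','R','_','R','E','C','O','N','C','I','L','E']) (by decide) (by decide) h1
      have e4 := pv_prefix_excl (q := ['B','U','Y','_']) (by decide) (by decide) h1
      have e5 := pv_prefix_excl (q := ['T','R','A','D','E','_']) (by decide) (by decide) h1
      simp [h1, e2, e3, e4, e5, PySem.Set.add]
    · by_cases h2 : PySem.Chars.startswith text.toList ['P','O','O','L','_']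
      · have e3 := pv_prefix_excl (q := ['P','A','P','E','R','_','R','E','C','O','N','C','I','L','E']) (by decide) (by decide) h2
        have e4 := pv_prefix_excl (q := ['B','U','Y','_']) (by decide) (by decide) h2
        have e5 := pv_prefix_excl (q := ['T','R','A','D','E','_']) (by decide) (by decide) h2
        simp [h1, h2, e3, e4, e5, PySem.Set.add]
      · by_cases h3 : PySem.Chars.startswith text.toList ['P','A','P','E','R','_','R','E','C','O','N','C','I','L','E']
        · have e4 := pv_prefix_excl (q := ['B','U','Y','_']) (by decide) (by decide) h3
          have e5 := pv_prefix_excl (q := ['T','R','A','D','E','_']) (by decide) (by decide) h3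
          simp [h1, h2, h3, e4, e5, PySem.Set.add]
        · by_cases h4 : PySem.Chars.startswith text.toList ['B','U','Y','_']
          · have e5 := pv_prefix_excl (q := ['T','R','A','D','E','_']) (by decide) (by decide) h4
            simp [h1, h2, h3, h4, e5, PySem.Set.add]
          · by_cases h5 : PySem.Chars.startswith text.toList ['T','R','A','D','E','_']
            · simp [h1, h2, h3, h4, h5, PySem.Set.add]
            · simp [h1, h2, h3, h4, h5]

-- the fold of A's body from any accumulator equals folding Set.add over the classified tags
theorem pv_fold_eq (codes : List String) (tags : List String) :
    codes.foldl pvStepA tags =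
    List.foldl PySem.Set.add tags
      (codes.filterMap (fun code => pvClassify (PySem.Str.upper (PySem.Str.strip code)))) := by
  induction codes generalizing tags with
  | nil => simp
  | cons c cs ih =>
    rw [List.foldl_cons, pv_step_eq tags c, List.filterMap_cons]
    cases h : pvClassify (PySem.Str.upper (PySem.Str.strip c)) with
    | none => simpa using ih tags
    | some t => simpa using ih (PySem.Set.add tags t)

-- A computes the ordered dedup of the classified tag sequence
theorem pv_A_eq (codes : List String) :
    trade_review_tags_py codes = PySem.List.dedup (pvSeq codes) := by
  unfold trade_review_tags_py pvSeq
  rw [pv_fold_eq]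
  rfl

-- dedup keeps the head and drops its later duplicates
theorem pv_dedup_cons (x : String) (s : List String) :
    PySem.List.dedup (x :: s) = x :: (PySem.List.dedup s).filter (fun y => !(y == x)) := by
  simp [pysem, PySem.Set.discard]

-- along dedup s, the first-occurrence index in s is strictly increasing
theorem pv_pairwise_idx (s : List String) :
    (PySem.List.dedup s).Pairwise
      (fun a b => (PySem.List.index? s a).getD 0 < (PySem.List.index? s b).getD 0) := by
  induction s with
  | nil => exact List.Pairwise.nil
  | cons x s ih =>
    rw [pv_dedup_cons]
    refine List.Pairwise.cons ?_ ?_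
    · intro y hy
      have hyx : y ≠ x := by simpa using List.of_mem_filter hy
      have hys : y ∈ s := (PySem.List.mem_dedup _ _).mp (List.mem_of_mem_filter hy)
      obtain ⟨k, hk⟩ : ∃ k, PySem.List.index? s y = some k :=
        Option.isSome_iff_exists.mp ((PySem.List.index?_isSome_iff s y).mpr hys)
      rw [PySem.List.index?_cons_self, PySem.List.index?_cons_of_ne s (Ne.symm hyx), hk]
      simp
    · have hpw := List.Pairwise.sublist (List.filter_sublist (l := PySem.List.dedup s) (p := fun y => !(y == x))) ih
      refine hpw.imp_of_mem ?_
      intro a b ha hb hab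
      have hax : a ≠ x := by simpa using List.of_mem_filter ha
      have hbx : b ≠ x := by simpa using List.of_mem_filter hb
      have has : a ∈ s := (PySem.List.mem_dedup _ _).mp (List.mem_of_mem_filter ha)
      have hbs : b ∈ s := (PySem.List.mem_dedup _ _).mp (List.mem_of_mem_filter hb)
      obtain ⟨j, hj⟩ : ∃ j, PySem.List.index? s a = some j :=
        Option.isSome_iff_exists.mp ((PySem.List.index?_isSome_iff s a).mpr has)
      obtain ⟨k, hk⟩ : ∃ k, PySem.List.index? s b = some k :=
        Option.isSome_iff_exists.mp ((PySem.List.index?_isSome_iff s b).mpr hbs)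
      rw [PySem.List.index?_cons_of_ne s (Ne.symm hax), PySem.List.index?_cons_of_ne s (Ne.symm hbx),
        hj, hk]
      rw [hj, hk] at hab
      simpa using hab

-- every classified tag is a tag of the prefix table
theorem pv_classify_mem {t a : String} (h : pvClassify t = some a) :
    ∃ pt ∈ pvPrefixTags, pt.2 = a := by
  unfold pvClassify at h
  obtain ⟨pt, hfind, hpt⟩ := Option.map_eq_some_iff.mp h
  exact ⟨pt, List.mem_of_find?_eq_some hfind, hpt⟩

theorem pv_mem_seq_tag {codes : List String} {a : String} (ha : a ∈ pvSeq codes) :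
    ∃ pt ∈ pvPrefixTags, pt.2 = a := by
  obtain ⟨c, _, hc⟩ := List.mem_filterMap.mp ha
  exact pv_classify_mem hc

-- dedup of the sequence is a permutation of the table tags present in it
theorem pv_perm (codes : List String) :
    (PySem.List.dedup (pvSeq codes)).Perm
      ((pvPrefixTags.filter (fun pt => decide (pt.2 ∈ pvSeq codes))).map (·.2)) := by
  have hnodup : ((pvPrefixTags.filter (fun pt => decide (pt.2 ∈ pvSeq codes))).map (·.2)).Nodup := by
    have hsub : ((pvPrefixTags.filter (fun pt => decide (pt.2 ∈ pvSeq codes))).map (·.2)).Sublist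
        (pvPrefixTags.map (·.2)) := List.Sublist.map _ List.filter_sublist
    exact List.Nodup.sublist hsub (by decide)
  rw [List.perm_ext_iff_of_nodup (PySem.List.nodup_dedup _) hnodup]
  intro a
  simp only [PySem.List.mem_dedup, List.mem_map, List.mem_filter, decide_eq_true_eq]
  constructor
  · intro ha
    obtain ⟨pt, hpt, hpta⟩ := pv_mem_seq_tag ha
    exact ⟨pt, ⟨hpt, hpta ▸ ha⟩, hpta⟩
  · rintro ⟨pt, ⟨_, hin⟩, rfl⟩
    exact hin

-- B's sort by first index reconstructs the first-seen order, i.e. the dedup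
theorem pv_sorted_eq (codes : List String) :
    trade_review_tags_py_alt codes = PySem.List.dedup (pvSeq codes) := by
  unfold trade_review_tags_py_alt
  exact PySem.List.sorted_eq_of_perm_of_pairwise_lt _ _ _ (pv_perm codes) (pv_pairwise_idx (pvSeq codes))

-- ===== VERDICT (by name: the statement is the Claim_ definition above) =====
theorem trade_review_tags_py_spec : Claim_equal_trade_review_tags_py := by
  intro codes _
  unfold Spec_trade_review_tags_py
  rw [pv_A_eq, pv_sorted_eq]
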